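-- pv_equiv track=rewrite | github.com/IorenzoLF/Le_Refuge | Le_refuge/src/temple_mathematique/collatz_core/exploration_arbre_inverse.py | profondeur_arbre
-- ===== SOURCE A (Python) =====
-- from collections import deque
--
-- def profondeur_arbre(arbre, racines=[1,2,4]):
--     """Calcule la profondeur maximale de l'arbre Collatz inversé jusqu'à N."""
--     profondeur = {}
--     queue = deque((r, 0) for r in racines)
--     while queue:
--         n, d = queue.popleft()
--         if n in profondeur:
--             continue
--         profondeur[n] = d
--         for enfant in arbre.get(n, []):
--             queue.append((enfant, d+1))
--     return max(profondeur.values()) if profondeur else 0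
-- ===== SOURCE B (Python) =====
-- def profondeur_arbre(arbre, racines=[1,2,4]):
--     """Profondeur maximale par BFS niveau par niveau (frontiere + compteur de niveau)."""
--     visited = set()
--     frontier = list(racines)
--     depth = 0
--     best = 0
--     while True:
--         new = []
--         for n in frontier:
--             if n not in visited and n not in new:
--                 new.append(n)
--         if not new:
--             return best
--         best = depth
--         visited.update(new)
--         frontier = [c for n in new for c in arbre.get(n, [])]
--         depth += 1
-- ===== Notes on version B (the rewrite author's own statement) =====
-- stated objective: alternative
-- what changed: Replaces A's queue of (node, depth) pairs with a per-node depth dict by a level-synchronized BFS: a visited set, a current-level frontier list and a level counter, returning the last level that contributed unvisited nodes.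
import Mathlib
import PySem

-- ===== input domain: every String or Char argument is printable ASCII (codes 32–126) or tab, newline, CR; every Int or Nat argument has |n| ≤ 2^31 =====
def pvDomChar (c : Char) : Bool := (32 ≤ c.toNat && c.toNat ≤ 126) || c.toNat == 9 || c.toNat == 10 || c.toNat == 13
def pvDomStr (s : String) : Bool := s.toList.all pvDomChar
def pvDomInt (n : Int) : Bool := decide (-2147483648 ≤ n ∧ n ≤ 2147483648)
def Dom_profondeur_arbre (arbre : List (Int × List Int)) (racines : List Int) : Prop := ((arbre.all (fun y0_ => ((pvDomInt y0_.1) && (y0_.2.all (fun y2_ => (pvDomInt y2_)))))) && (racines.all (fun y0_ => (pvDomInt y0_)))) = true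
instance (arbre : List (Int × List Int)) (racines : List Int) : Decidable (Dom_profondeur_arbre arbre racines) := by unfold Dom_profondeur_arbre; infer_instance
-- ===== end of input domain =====

-- B replaces A's queue-of-(node,depth)-pairs + per-node depth dict by a level-synchronized BFS
-- (frontier list + visited set + level counter); same return value, proved equal.

-- ===== PORT A =====
-- arbre.get(n, [])
def pvChildren (arbre : List (Int × List Int)) (n : Int) : List Int :=
  ((PySem.Dict.mk arbre).get? n).getD []

-- children come from the value lists of arbre (used only for termination of the ports)
theorem pvChildren_subset (arbre : List (Int × List Int)) (n : Int) :
    ∀ c ∈ pvChildren arbre n, c ∈ (arbre.map Prod.snd).flatten := by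
  induction arbre with
  | nil => simp [pvChildren, PySem.Dict.get?]
  | cons p rest ih =>
    intro c hc
    rcases p with ⟨k, v⟩
    rw [pvChildren, PySem.Dict.get?_mk_cons] at hc
    by_cases hk : (k == n)
    · simp [hk] at hc
      simp [hc]
    · simp [hk] at hc
      have := ih c (by rw [pvChildren]; exact hc)
      simp at this ⊢
      tauto

-- the while-queue loop of A (BFS with an explicit (node, depth) queue and the depth dict)
def pvALoop (arbre : List (Int × List Int)) (prof : PySem.Dict Int Int)
    (queue : List (Int × Int)) : PySem.Dict Int Int :=
  match queue with
  | [] => prof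
  | (n, d) :: q =>
    if h : prof.contains n then pvALoop arbre prof q
    else pvALoop arbre (prof.insert n d) (q ++ (pvChildren arbre n).map (fun c => (c, d + 1)))
termination_by (((arbre.map Prod.fst).toFinset \ prof.keys.toFinset).card, queue.length)
decreasing_by
  · exact Prod.Lex.right _ (Nat.lt_succ_self _)
  · have hc : prof.contains n = false := by simpa using h
    by_cases hv : n ∈ (arbre.map Prod.fst).toFinset
    · apply Prod.Lex.left
      apply Finset.card_lt_card
      constructor
      · intro x hx
        simp only [Finset.mem_sdiff, List.mem_toFinset,
          PySem.Dict.keys_insert_of_not_contains _ _ hc, List.mem_append] at hx ⊢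
        exact ⟨hx.1, fun hx2 => hx.2 (Or.inl hx2)⟩
      · intro hsub
        have hn1 : n ∈ (arbre.map Prod.fst).toFinset \ prof.keys.toFinset := by
          simp only [Finset.mem_sdiff, List.mem_toFinset]
          refine ⟨by simpa using hv, fun hmem => ?_⟩
          exact absurd ((PySem.Dict.contains_iff_mem_keys prof n).mpr hmem) (by simp [hc])
        have hn2 := hsub hn1
        simp only [Finset.mem_sdiff, List.mem_toFinset,
          PySem.Dict.keys_insert_of_not_contains _ _ hc, List.mem_append] at hn2
        exact hn2.2 (Or.inr (by simp))
    · have hch : pvChildren arbre n = [] := by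
        rw [pvChildren]
        have : (PySem.Dict.mk arbre).get? n = none := by
          rw [PySem.Dict.get?_eq_none_iff_not_mem_keys]
          simpa [PySem.Dict.keys_mk] using hv
        simp [this]
      have hfin : (arbre.map Prod.fst).toFinset \ ((prof.insert n d).keys).toFinset
          = (arbre.map Prod.fst).toFinset \ prof.keys.toFinset := by
        ext x
        simp only [Finset.mem_sdiff, List.mem_toFinset,
          PySem.Dict.keys_insert_of_not_contains _ _ hc, List.mem_append]
        constructor
        · rintro ⟨h1, h2⟩; exact ⟨h1, fun hx => h2 (Or.inl hx)⟩
        · rintro ⟨h1, h2⟩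
          refine ⟨h1, ?_⟩
          rintro (hx | hx)
          · exact h2 hx
          · simp at hx; subst hx; exact hv (by simpa using h1)
      rw [hfin]
      apply Prod.Lex.right
      simp [hch]

-- max(profondeur.values()) if profondeur else 0
def pvFinish (prof : PySem.Dict Int Int) : Int :=
  if prof.size = 0 then 0 else (PySem.List.max? prof.values (fun v => v)).getD 0

def profondeur_arbre (arbre : List (Int × List Int)) (racines : List Int) : Int :=
  pvFinish (pvALoop arbre PySem.Dict.empty (racines.map (fun r => (r, (0 : Int)))))

-- ===== PORT B =====
-- the inner 'for n in frontier: if n not in visited and n not in new: new.append(n)' loop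
def pvCollectNew (visited : PySem.Set Int) (new : List Int) (frontier : List Int) : List Int :=
  match frontier with
  | [] => new
  | n :: rest =>
    if visited.contains n || decide (n ∈ new) then pvCollectNew visited new rest
    else pvCollectNew visited (new ++ [n]) rest

-- elements of the collected level (used only for termination of pvBLoop)
theorem pvCollectNew_mem (visited : PySem.Set Int) :
    ∀ (frontier new : List Int), ∀ x ∈ pvCollectNew visited new frontier,
      x ∈ new ∨ (x ∈ frontier ∧ x ∉ visited) := by
  intro frontier
  induction frontier with
  | nil => intro new x hx; exact Or.inl (by simpa [pvCollectNew] using hx)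
  | cons n rest ih =>
    intro new x hx
    rw [pvCollectNew] at hx
    by_cases hcond : (visited.contains n || decide (n ∈ new)) = true
    · rw [if_pos hcond] at hx
      rcases ih new x hx with h | h
      · exact Or.inl h
      · exact Or.inr ⟨List.mem_cons_of_mem _ h.1, h.2⟩
    · rw [if_neg hcond] at hx
      simp only [Bool.or_eq_true, decide_eq_true_eq, not_or] at hcond
      rcases ih (new ++ [n]) x hx with h | h
      · rcases List.mem_append.mp h with h' | h'
        · exact Or.inl h'
        · simp at h'
          subst h'
          exact Or.inr ⟨List.mem_cons_self, fun hm =>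
            hcond.1 ((PySem.Set.contains_iff _ _).mpr hm)⟩
      · exact Or.inr ⟨List.mem_cons_of_mem _ h.1, h.2⟩

-- the level-by-level loop of B
def pvBLoop (arbre : List (Int × List Int)) (visited : PySem.Set Int)
    (frontier : List Int) (depth best : Int) : Int :=
  let new := pvCollectNew visited [] frontier
  if h : new = [] then best
  else pvBLoop arbre (visited.update new) (new.flatMap (pvChildren arbre)) (depth + 1) depth
termination_by ((frontier.toFinset ∪ ((arbre.map Prod.snd).flatten).toFinset) \ visited.toFinset).card
decreasing_by
  apply Finset.card_lt_card
  constructor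
  · intro x hx
    simp only [Finset.mem_sdiff, Finset.mem_union, List.mem_toFinset] at hx ⊢
    have hnv : x ∉ visited.update new := by simpa using hx.2
    rw [PySem.Set.mem_update] at hnv
    refine ⟨?_, fun hv => hnv (Or.inl hv)⟩
    rcases hx.1 with h | h
    · right
      rcases List.mem_flatMap.mp h with ⟨n, _, hc⟩
      exact pvChildren_subset arbre n x hc
    · right; exact h
  · intro hsub
    rcases List.exists_mem_of_ne_nil _ h with ⟨n₀, hn₀⟩
    rcases pvCollectNew_mem visited frontier [] n₀ hn₀ with h' | h'
    · simp at h'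
    · have hin : n₀ ∈ (frontier.toFinset ∪ ((arbre.map Prod.snd).flatten).toFinset) \ visited.toFinset := by
        simp only [Finset.mem_sdiff, Finset.mem_union, List.mem_toFinset]
        exact ⟨Or.inl h'.1, h'.2⟩
      have := hsub hin
      simp only [Finset.mem_sdiff, List.mem_toFinset] at this
      exact this.2 ((PySem.Set.mem_update _ _ _).mpr (Or.inr hn₀))

def profondeur_arbre_alt (arbre : List (Int × List Int)) (racines : List Int) : Int :=
  pvBLoop arbre PySem.Set.empty racines 0 0

-- ===== PRECONDITION & SPEC =====
def Spec_profondeur_arbre (arbre : List (Int × List Int)) (racines : List Int) (out : Int) : Prop := out = profondeur_arbre_alt arbre racines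
instance (arbre : List (Int × List Int)) (racines : List Int) (out : Int) : Decidable (Spec_profondeur_arbre arbre racines out) := by unfold Spec_profondeur_arbre; infer_instance

-- ===== CLAIM (what is proved, stated in full; the proofs are below) =====
def Claim_equal_profondeur_arbre : Prop := ∀ (arbre : List (Int × List Int)) (racines : List Int), Dom_profondeur_arbre arbre racines → Spec_profondeur_arbre arbre racines (profondeur_arbre arbre racines)

-- ===== LEMMAS AND PROOFS =====

-- the nodes of a level that A inserts / B collects: first occurrences not yet seen
def pvNewK : List Int → List Int → List Int
  | _, [] => []
  | seen, n :: L => if n ∈ seen then pvNewK seen L else n :: pvNewK (n :: seen) L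

def pvInsertAll (prof : PySem.Dict Int Int) (L : List Int) (d : Int) : PySem.Dict Int Int :=
  L.foldl (fun p n => p.insert n d) prof

theorem pvNewK_congr : ∀ (L s₁ s₂ : List Int), (∀ x : Int, x ∈ s₁ ↔ x ∈ s₂) →
    pvNewK s₁ L = pvNewK s₂ L := by
  intro L
  induction L with
  | nil => intro _ _ _; rfl
  | cons n L ih =>
    intro s₁ s₂ hmem
    simp only [pvNewK]
    by_cases h1 : n ∈ s₁
    · rw [if_pos h1, if_pos ((hmem n).mp h1)]
      exact ih s₁ s₂ hmem
    · rw [if_neg h1, if_neg (fun h => h1 ((hmem n).mpr h))]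
      congr 1
      exact ih _ _ (by intro x; simp [hmem x])

theorem pvNewK_props : ∀ (L seen : List Int),
    (∀ x ∈ pvNewK seen L, x ∉ seen) ∧ (pvNewK seen L).Nodup := by
  intro L
  induction L with
  | nil => intro seen; simp [pvNewK]
  | cons n L ih =>
    intro seen
    simp only [pvNewK]
    by_cases h : n ∈ seen
    · rw [if_pos h]; exact ih seen
    · rw [if_neg h]
      have ⟨ihm, ihn⟩ := ih (n :: seen)
      constructor
      · intro x hx
        rcases List.mem_cons.mp hx with rfl | hx'
        · exact h
        · exact fun hs => ihm x hx' (List.mem_cons_of_mem _ hs)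
      · refine List.nodup_cons.mpr ⟨fun hx => ?_, ihn⟩
        exact ihm n hx List.mem_cons_self

theorem pvCollect_eq (visited : PySem.Set Int) : ∀ (frontier new : List Int),
    pvCollectNew visited new frontier = new ++ pvNewK (visited ++ new) frontier := by
  intro frontier
  induction frontier with
  | nil => intro new; simp [pvCollectNew, pvNewK]
  | cons n rest ih =>
    intro new
    rw [pvCollectNew]
    simp only [pvNewK]
    by_cases hcond : (visited.contains n || decide (n ∈ new)) = true
    · have hm : n ∈ visited ++ new := by
        rcases Bool.or_eq_true_iff.mp hcond with h | h
        · exact List.mem_append.mpr (Or.inl ((PySem.Set.contains_iff _ _).mp h))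
        · exact List.mem_append.mpr (Or.inr (of_decide_eq_true h))
      rw [if_pos hcond, if_pos hm]
      exact ih new
    · have hm : n ∉ visited ++ new := by
        intro hx
        apply hcond
        rcases List.mem_append.mp hx with h | h
        · exact Bool.or_eq_true_iff.mpr (Or.inl ((PySem.Set.contains_iff visited n).mpr h))
        · exact Bool.or_eq_true_iff.mpr (Or.inr (decide_eq_true h))
      rw [if_neg hcond, if_neg hm]
      rw [ih (new ++ [n])]
      rw [List.append_assoc]
      congr 1
      rw [List.singleton_append]
      congr 1
      apply pvNewK_congr
      intro x; simp; tauto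

theorem pvALoop_nil (arbre : List (Int × List Int)) (prof : PySem.Dict Int Int) :
    pvALoop arbre prof [] = prof := by
  rw [pvALoop]

theorem pvALoop_cons (arbre : List (Int × List Int)) (prof : PySem.Dict Int Int)
    (n d : Int) (q : List (Int × Int)) :
    pvALoop arbre prof ((n, d) :: q) =
      if prof.contains n then pvALoop arbre prof q
      else pvALoop arbre (prof.insert n d) (q ++ (pvChildren arbre n).map (fun c => (c, d + 1))) := by
  rw [pvALoop]
  split_ifs with h <;> rfl

theorem pvALoop_level (arbre : List (Int × List Int)) : ∀ (L : List Int)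
    (prof : PySem.Dict Int Int) (M : List Int) (d : Int),
    pvALoop arbre prof (L.map (fun n => (n, d)) ++ M.map (fun n => (n, d + 1)))
      = pvALoop arbre (pvInsertAll prof (pvNewK prof.keys L) d)
          ((M ++ (pvNewK prof.keys L).flatMap (pvChildren arbre)).map (fun n => (n, d + 1))) := by
  intro L
  induction L with
  | nil =>
    intro prof M d
    simp [pvNewK, pvInsertAll]
  | cons n L ih =>
    intro prof M d
    rw [List.map_cons, List.cons_append, pvALoop_cons]
    by_cases hc : prof.contains n
    · rw [if_pos hc, ih prof M d]
      have hn : n ∈ prof.keys := (PySem.Dict.contains_iff_mem_keys prof n).mp hc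
      simp only [pvNewK, if_pos hn]
    · rw [if_neg hc]
      have hc' : prof.contains n = false := by simpa using hc
      have hkeys : ((prof.insert n d).keys) = prof.keys ++ [n] :=
        PySem.Dict.keys_insert_of_not_contains _ _ hc'
      have hq : (L.map (fun n => (n, d)) ++ M.map (fun n => (n, d + 1)))
            ++ (pvChildren arbre n).map (fun c => (c, d + 1))
          = L.map (fun n => (n, d)) ++ (M ++ pvChildren arbre n).map (fun n => (n, d + 1)) := by
        rw [List.append_assoc, List.map_append]
      rw [hq, ih (prof.insert n d) (M ++ pvChildren arbre n) d]
      have hnk : n ∉ prof.keys := by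
        intro hm
        rw [(PySem.Dict.contains_iff_mem_keys prof n).mpr hm] at hc'
        exact Bool.true_eq_false.mp hc'
      have hnew : pvNewK prof.keys (n :: L) = n :: pvNewK ((prof.insert n d).keys) L := by
        simp only [pvNewK, if_neg hnk]
        congr 1
        apply pvNewK_congr
        intro x
        rw [hkeys]
        simp
        tauto
      rw [hnew]
      have hins : pvInsertAll prof (n :: pvNewK ((prof.insert n d).keys) L) d
          = pvInsertAll (prof.insert n d) (pvNewK ((prof.insert n d).keys) L) d := rfl
      rw [hins]
      congr 1
      rw [List.flatMap_cons, ← List.append_assoc]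

theorem pvMax?_eq (xs : List Int) (d : Int) (hle : ∀ v ∈ xs, v ≤ d) (hd : d ∈ xs) :
    PySem.List.max? xs (fun v => v) = some d := by
  cases hm : PySem.List.max? xs (fun v => v) with
  | none =>
    rw [PySem.List.max?_eq_none_iff] at hm
    subst hm
    simp at hd
  | some m =>
    have h1 : d ≤ m := PySem.List.max?_isMax hm d hd
    have h2 : m ∈ xs := PySem.List.max?_mem hm
    have h3 : m ≤ d := hle m h2
    congr 1
    omega

theorem pvMain (arbre : List (Int × List Int)) : ∀ (visited : PySem.Set Int)
    (frontier : List Int) (d best : Int) (prof : PySem.Dict Int Int),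
    (∀ x, prof.contains x = true ↔ x ∈ visited) →
    ((prof.values = [] ∧ best = 0) ∨
      (PySem.List.max? prof.values (fun v => v) = some best ∧ ∀ v ∈ prof.values, v < d)) →
    pvFinish (pvALoop arbre prof (frontier.map (fun n => (n, d)))) = pvBLoop arbre visited frontier d best := by
  intro visited frontier d best
  have hgen : ∀ (prof : PySem.Dict Int Int),
      (∀ x, prof.contains x = true ↔ x ∈ visited) →
      ((prof.values = [] ∧ best = 0) ∨
        (PySem.List.max? prof.values (fun v => v) = some best ∧ ∀ v ∈ prof.values, v < d)) →
      pvFinish (pvALoop arbre prof (frontier.map (fun n => (n, d)))) = pvBLoop arbre visited frontier d best := by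
    fun_induction pvBLoop arbre visited frontier d best with
    | case1 visited frontier d best new h =>
      intro prof hk hvals
      have hkeyvis : ∀ x : Int, x ∈ prof.keys ↔ x ∈ visited := fun x =>
        (PySem.Dict.contains_iff_mem_keys prof x).symm.trans (hk x)
      have h1 : pvNewK visited frontier = [] := by
        have hce := pvCollect_eq visited frontier []
        simp only [List.append_nil, List.nil_append] at hce
        rw [← hce]
        exact h
      have hnewk : pvNewK prof.keys frontier = [] := by
        rw [pvNewK_congr frontier prof.keys visited hkeyvis, h1]
      have hrun : pvALoop arbre prof (frontier.map (fun n => (n, d))) = prof := by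
        have hlv := pvALoop_level arbre frontier prof [] d
        simp only [List.map_nil, List.append_nil, hnewk, pvInsertAll, List.foldl_nil,
          List.flatMap_nil, pvALoop_nil] at hlv
        exact hlv
      rw [hrun]
      rcases hvals with ⟨hv, rfl⟩ | ⟨hmax, _⟩
      · have hsz : prof.size = 0 := by
          have : prof.items = [] := List.map_eq_nil_iff.mp hv
          simp [PySem.Dict.size, this]
        rw [pvFinish, if_pos hsz]
      · have hne : prof.size ≠ 0 := by
          intro h0
          have : prof.items = [] := List.length_eq_zero_iff.mp h0
          rw [PySem.Dict.values, this] at hmax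
          simp [PySem.List.max?] at hmax
        rw [pvFinish, if_neg hne, hmax]
        rfl
    | case2 visited frontier d best new h ih =>
      intro prof hk hvals
      have hkeyvis : ∀ x : Int, x ∈ prof.keys ↔ x ∈ visited := fun x =>
        (PySem.Dict.contains_iff_mem_keys prof x).symm.trans (hk x)
      have hnewk : pvNewK prof.keys frontier = new := by
        rw [pvNewK_congr frontier prof.keys visited hkeyvis]
        have hce := pvCollect_eq visited frontier []
        simp only [List.append_nil, List.nil_append] at hce
        exact hce.symm
      have hfresh : ∀ x ∈ new, prof.contains x = false := by
        intro x hx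
        rw [← hnewk] at hx
        have hxk := (pvNewK_props frontier prof.keys).1 x hx
        cases hcx : prof.contains x with
        | false => rfl
        | true => exact absurd ((PySem.Dict.contains_iff_mem_keys _ _).mp hcx) hxk
      have hnd : new.Nodup := by
        rw [← hnewk]
        exact (pvNewK_props frontier prof.keys).2
      have hrun : pvALoop arbre prof (frontier.map (fun n => (n, d)))
          = pvALoop arbre (pvInsertAll prof new d)
              ((new.flatMap (pvChildren arbre)).map (fun n => (n, d + 1))) := by
        have hlv := pvALoop_level arbre frontier prof [] d
        simp only [List.map_nil, List.append_nil, List.nil_append, hnewk] at hlv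
        exact hlv
      rw [hrun]
      have hitems : (pvInsertAll prof new d).items
          = prof.items ++ new.map (fun a => (a, d)) := by
        have := PySem.Dict.items_foldl_insert_fresh new (fun a : Int => a) (fun _ : Int => d)
          prof hfresh (by simpa using hnd)
        simpa [pvInsertAll] using this
      have hvalues : (pvInsertAll prof new d).values
          = prof.values ++ new.map (fun _ => d) := by
        rw [PySem.Dict.values, hitems, List.map_append, List.map_map]
        rfl
      have hkeys : (pvInsertAll prof new d).keys = PySem.Set.update prof.keys new := by
        exact PySem.Dict.keys_foldl_insert new (fun _ _ => d) prof
      have hvold : ∀ v ∈ prof.values, v < d := by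
        rcases hvals with ⟨hv, _⟩ | ⟨_, hlt⟩
        · rw [hv]; intro v hv'; simp at hv'
        · exact hlt
      obtain ⟨n₀, hn₀⟩ := List.exists_mem_of_ne_nil _ h
      apply ih (pvInsertAll prof new d)
      · intro x
        rw [PySem.Dict.contains_iff_mem_keys, hkeys, PySem.Set.mem_update,
          PySem.Set.mem_update]
        constructor
        · rintro (hx | hx)
          · exact Or.inl ((hkeyvis x).mp hx)
          · exact Or.inr hx
        · rintro (hx | hx)
          · exact Or.inl ((hkeyvis x).mpr hx)
          · exact Or.inr hx
      · right
        constructor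
        · apply pvMax?_eq
          · intro v hv
            rw [hvalues] at hv
            rcases List.mem_append.mp hv with hv | hv
            · exact le_of_lt (hvold v hv)
            · rcases List.mem_map.mp hv with ⟨a, _, rfl⟩
              exact le_refl d
          · rw [hvalues]
            exact List.mem_append.mpr (Or.inr (List.mem_map.mpr ⟨n₀, hn₀, rfl⟩))
        · intro v hv
          rw [hvalues] at hv
          rcases List.mem_append.mp hv with hv | hv
          · have := hvold v hv
            omega
          · rcases List.mem_map.mp hv with ⟨a, _, rfl⟩
            omega
  exact hgen

-- ===== VERDICT (by name: the statement is the Claim_ definition above) =====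
theorem profondeur_arbre_spec : Claim_equal_profondeur_arbre := by
  intro arbre racines _
  unfold Spec_profondeur_arbre profondeur_arbre profondeur_arbre_alt
  apply pvMain
  · intro x; simp [PySem.Dict.contains_empty, PySem.Set.empty]
  · left
    constructor
    · simp [PySem.Dict.values, PySem.Dict.empty]
    · rfl
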